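-- pv_equiv track=rewrite | github.com/DragynSlayr/CPSC231-Reversi | team_tasks/task6/ScreenState.py | convert_token_list_to_string
-- ===== SOURCE A (Python) =====
-- def convert_token_list_to_string(tokenStateList):
-- 	#Declare letter, which tracks which letter we are using in the list
-- 	letter = 0
--
-- 	#Declare a variable which will store the string
-- 		#Variable is assigned 'x' in order to mark that this is the first line that characters are added to
-- 	tokenStateString = 'x'
--
--
-- 	for line in tokenStateList:
-- 		#And for each element in the line list
--
-- 		for location in line:
-- 			#add the character to the string
-- 			tokenStateString = tokenStateString + location
--
--
-- 			letter = letter+1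
--
-- 			if letter >=8:
-- 				#Mark the change of line with an 'x'
-- 				tokenStateString =tokenStateString +'x'
--
-- 				#Then reset this counter
-- 				letter = 0
--
-- 	return tokenStateString
-- ===== SOURCE B (Python) =====
-- def convert_token_list_to_string(tokenStateList):
--     # Flatten once, then emit fixed-size chunks of 8 tokens, with an 'x'
--     # sentinel before the first chunk and after every full chunk.
--     flat = [loc for line in tokenStateList for loc in line]
--     parts = ['x']
--     i = 0
--     while i < len(flat):
--         chunk = flat[i:i + 8]
--         parts.append(''.join(chunk))
--         if len(chunk) == 8:
--             parts.append('x')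
--         i += 8
--     return ''.join(parts)
-- ===== Notes on version B (the rewrite author's own statement) =====
-- stated objective: alternative
-- what changed: Replaces the per-token counter threaded through two nested loops by a one-shot flatten followed by fixed-size chunking (slice off 8 tokens at a time, join each chunk, append the sentinel after full chunks), collecting parts in a list joined once.
import Mathlib
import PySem

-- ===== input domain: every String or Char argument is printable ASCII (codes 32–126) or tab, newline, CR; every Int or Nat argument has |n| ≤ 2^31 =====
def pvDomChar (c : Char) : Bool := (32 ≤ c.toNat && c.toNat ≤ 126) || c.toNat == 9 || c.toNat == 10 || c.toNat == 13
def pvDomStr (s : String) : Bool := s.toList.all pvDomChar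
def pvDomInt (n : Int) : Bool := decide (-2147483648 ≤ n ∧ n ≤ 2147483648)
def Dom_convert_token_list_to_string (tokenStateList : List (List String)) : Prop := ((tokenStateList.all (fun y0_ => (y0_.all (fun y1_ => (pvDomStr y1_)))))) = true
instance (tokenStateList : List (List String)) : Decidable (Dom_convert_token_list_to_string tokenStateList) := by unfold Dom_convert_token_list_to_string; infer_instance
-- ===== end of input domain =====

-- B replaces A's nested loops with a per-token counter by flattening once and emitting
-- fixed-size chunks of 8 tokens (objective: alternative decomposition, same cost).


-- ===== PORT A =====
-- state = (letter, tokenStateString), updated per token exactly as A does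
def aStep (st : Int × String) (location : String) : Int × String :=
  let s := st.2 ++ location
  let l := st.1 + 1
  if l ≥ 8 then (0, s ++ "x") else (l, s)

def convert_token_list_to_string (tokenStateList : List (List String)) : String :=
  (tokenStateList.foldl (fun st line => line.foldl aStep st) ((0 : Int), "x")).2

-- ===== PORT B =====
-- the while loop of Source B: chunk = flat[i:i+8]; append its join, an 'x' after full chunks; i += 8
def bLoop (flat : List String) (i : Nat) : List String :=
  if i < flat.length then
    let chunk := PySem.List.slice flat (some (i : Int)) (some ((i : Int) + 8))
    String.join chunk :: ((if chunk.length == 8 then ["x"] else []) ++ bLoop flat (i + 8))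
  else []
termination_by flat.length - i

def convert_token_list_to_string_alt (tokenStateList : List (List String)) : String :=
  String.join ("x" :: bLoop tokenStateList.flatten 0)

-- ===== PRECONDITION & SPEC =====
def Spec_convert_token_list_to_string (tokenStateList : List (List String)) (out : String) : Prop := out = convert_token_list_to_string_alt tokenStateList
instance (tokenStateList : List (List String)) (out : String) : Decidable (Spec_convert_token_list_to_string tokenStateList out) := by unfold Spec_convert_token_list_to_string; infer_instance

-- ===== CLAIM (what is proved, stated in full; the proofs are below) =====
def Claim_equal_convert_token_list_to_string : Prop := ∀ (tokenStateList : List (List String)), Dom_convert_token_list_to_string tokenStateList → Spec_convert_token_list_to_string tokenStateList (convert_token_list_to_string tokenStateList)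

-- ===== LEMMAS AND PROOFS =====

-- proof-only helper: the chunk decomposition both ports are reduced to
def bGo (flat : List String) : List String :=
  if flat = [] then []
  else
    let chunk := flat.take 8
    String.join chunk :: ((if chunk.length == 8 then ["x"] else []) ++ bGo (flat.drop 8))
termination_by flat.length
decreasing_by
  cases flat with
  | nil => simp_all
  | cons a t => simp only [List.length_drop, List.length_cons]; omega

theorem bLoop_eq_bGo : ∀ (n : Nat) (flat : List String) (i : Nat), flat.length - i ≤ n →
    bLoop flat i = bGo (flat.drop i) := by
  intro n
  induction n with
  | zero =>
    intro flat i h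
    have hge : flat.length ≤ i := by omega
    rw [bLoop, bGo]
    simp [List.drop_eq_nil_of_le hge, Nat.not_lt.mpr hge]
  | succ n ih =>
    intro flat i h
    by_cases hlt : i < flat.length
    · rw [bLoop]
      simp only [hlt, if_true]
      have hslice : PySem.List.slice flat (some (i : Int)) (some ((i : Int) + 8))
          = (flat.drop i).take 8 := by
        have := PySem.List.slice_natCast_add flat i 8
        push_cast at this ⊢
        exact this
      have hne : flat.drop i ≠ [] := by
        intro hh
        have := congrArg List.length hh
        simp only [List.length_drop, List.length_nil] at this
        omega
      rw [bGo]
      simp only [hne, if_false]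
      rw [hslice, List.drop_drop, ih flat (i + 8) (by omega)]
    · rw [bLoop, bGo]
      simp [List.drop_eq_nil_of_le (Nat.not_lt.mp hlt), hlt]

theorem foldl_append_join (l : List String) : ∀ acc : String, l.foldl (fun r s => r ++ s) acc = acc ++ String.join l := by
  induction l with
  | nil => intro acc; simp [String.join]
  | cons t ts ih =>
    intro acc
    simp only [List.foldl_cons]
    rw [ih (acc ++ t)]
    have : String.join (t :: ts) = t ++ String.join ts := by
      show List.foldl (fun r s => r ++ s) "" (t :: ts) = _
      simp only [List.foldl_cons]
      rw [ih ("" ++ t)]; simp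
    rw [this, String.append_assoc]

theorem join_cons (a : String) (l : List String) : String.join (a :: l) = a ++ String.join l := by
  show List.foldl (fun r s => r ++ s) "" (a :: l) = _
  simp only [List.foldl_cons]
  rw [foldl_append_join l ("" ++ a)]; simp

theorem aRun_small : ∀ (c : List String) (l : Int) (s : String), 0 ≤ l → l + c.length < 8 →
    c.foldl aStep (l, s) = (l + c.length, s ++ String.join c) := by
  intro c
  induction c with
  | nil => intro l s _ _; simp [String.join]
  | cons t ts ih =>
    intro l s hl hlt
    simp only [List.foldl_cons, List.length_cons] at *
    have hc : ¬ ((l + 1 : Int) ≥ 8) := by push_cast at hlt; omega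
    have hstep : aStep (l, s) t = (l + 1, s ++ t) := by simp [aStep, hc]
    rw [hstep, ih (l + 1) (s ++ t) (by omega) (by push_cast at hlt ⊢; omega)]
    rw [join_cons, ← String.append_assoc]
    simp only [Prod.mk.injEq]
    constructor
    · push_cast; ring
    · trivial

theorem aRun_full : ∀ (c : List String) (l : Int) (s : String), c ≠ [] → 0 ≤ l → l + c.length = 8 →
    c.foldl aStep (l, s) = (0, s ++ String.join c ++ "x") := by
  intro c
  induction c with
  | nil => intro l s hne _ _; exact absurd rfl hne
  | cons t ts ih =>
    intro l s _ hl hlt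
    simp only [List.foldl_cons, List.length_cons] at *
    by_cases hend : ts = []
    · subst hend
      simp only [List.length_nil] at hlt
      have hc : (l + 1 : Int) ≥ 8 := by push_cast at hlt; omega
      have hstep : aStep (l, s) t = (0, s ++ t ++ "x") := by simp [aStep, hc]
      rw [hstep]
      simp [String.join]
    · have hpos : 0 < ts.length := List.length_pos_iff.mpr hend
      have hc : ¬ ((l + 1 : Int) ≥ 8) := by push_cast at hlt; omega
      have hstep : aStep (l, s) t = (l + 1, s ++ t) := by simp [aStep, hc]
      rw [hstep, ih (l + 1) (s ++ t) hend (by omega) (by push_cast at hlt ⊢; omega)]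
      rw [join_cons, ← String.append_assoc]

theorem aRun_bGo : ∀ (n : Nat) (flat : List String) (s : String), flat.length ≤ n →
    (flat.foldl aStep ((0 : Int), s)).2 = s ++ String.join (bGo flat) := by
  intro n
  induction n with
  | zero =>
    intro flat s h
    have : flat = [] := List.length_eq_zero_iff.mp (Nat.le_zero.mp h)
    subst this; simp [bGo, String.join]
  | succ n ih =>
    intro flat s h
    by_cases hnil : flat = []
    · subst hnil; simp [bGo, String.join]
    · rw [bGo]
      simp only [hnil, if_false]
      by_cases hlen : flat.length < 8
      · have hdrop : flat.drop 8 = [] := List.drop_eq_nil_of_le (by omega)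
        have htake : flat.take 8 = flat := List.take_of_length_le (by omega)
        have h8 : (flat.length == 8) = false := by simp; omega
        rw [aRun_small flat 0 s le_rfl (by omega)]
        simp [htake, hdrop, h8, bGo, String.join]
      · have htlen : (flat.take 8).length = 8 := by simp; omega
        have htne : flat.take 8 ≠ [] := by
          intro hh; rw [hh] at htlen; simp at htlen
        conv_lhs => rw [(List.take_append_drop 8 flat).symm]
        rw [List.foldl_append,
            aRun_full (flat.take 8) 0 s htne le_rfl (by simp [htlen]),
            ih (flat.drop 8) _ (by simp only [List.length_drop]; omega)]
        simp [htlen, join_cons, String.append_assoc]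

-- ===== VERDICT (by name: the statement is the Claim_ definition above) =====
theorem convert_token_list_to_string_spec : Claim_equal_convert_token_list_to_string := by
  intro l _
  unfold Spec_convert_token_list_to_string convert_token_list_to_string convert_token_list_to_string_alt
  rw [← List.foldl_flatten, aRun_bGo l.flatten.length l.flatten "x" le_rfl, join_cons,
      bLoop_eq_bGo l.flatten.length l.flatten 0 (by omega), List.drop_zero]
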